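-- pv_equiv track=rewrite | github.com/markedel/python-g | filefmt.py | countLinesAndCols
-- ===== SOURCE A (Python) =====
-- def countLinesAndCols(text, endPos, startLine, startCol):
--     line = startLine
--     col = startCol
--     for i, c in enumerate(text):
--         if i >= endPos:
--             return line, col
--         if c == '\n':
--             col = 0
--             line += 1
--         else:
--             col += 1
--     return line, col
-- ===== SOURCE B (Python) =====
-- def countLinesAndCols(text, endPos, startLine, startCol):
--     n = max(0, min(endPos, len(text)))
--     line = startLine + text.count('\n', 0, n)
--     last = text.rfind('\n', 0, n)
--     if last == -1:
--         return line, startCol + n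
--     return line, n - last - 1
-- ===== Notes on version B (the rewrite author's own statement) =====
-- stated objective: faster
-- what changed: Replaced the char-by-char enumerate loop with a clamp of endPos followed by builtin substring scans: text.count for the line count and text.rfind for the column (constant-factor speedup from C-level builtins).
import Mathlib
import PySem

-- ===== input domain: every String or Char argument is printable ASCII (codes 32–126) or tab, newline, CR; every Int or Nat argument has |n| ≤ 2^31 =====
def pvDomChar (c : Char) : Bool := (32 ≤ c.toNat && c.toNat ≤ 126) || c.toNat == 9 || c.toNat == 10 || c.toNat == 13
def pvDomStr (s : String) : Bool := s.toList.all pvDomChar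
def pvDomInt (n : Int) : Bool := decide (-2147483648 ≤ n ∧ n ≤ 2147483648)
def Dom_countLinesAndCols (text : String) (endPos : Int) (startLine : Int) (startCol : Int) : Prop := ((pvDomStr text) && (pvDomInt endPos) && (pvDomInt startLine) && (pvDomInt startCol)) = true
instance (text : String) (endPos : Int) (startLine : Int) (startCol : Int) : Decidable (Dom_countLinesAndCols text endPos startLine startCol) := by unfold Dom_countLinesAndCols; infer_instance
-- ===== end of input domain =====

-- B replaces A's char-by-char loop with a clamp of endPos plus builtin substring
-- scans (count for the line, rfind for the column); same cost class, more idiomatic.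

-- ===== PORT A =====
-- the 'for i, c in enumerate(text)' loop with its early return, step for step
def pvGoA (endPos : Int) : Nat → List Char → Int → Int → Int × Int
  | _, [], line, col => (line, col)
  | i, c :: rest, line, col =>
    if (i : Int) ≥ endPos then (line, col)
    else if c = '\n' then pvGoA endPos (i + 1) rest (line + 1) 0
    else pvGoA endPos (i + 1) rest line (col + 1)

def countLinesAndCols (text : String) (endPos : Int) (startLine : Int) (startCol : Int) : Int × Int :=
  pvGoA endPos 0 text.toList startLine startCol

-- ===== PORT B =====
-- hand-port of text.rfind('\n', 0, n) on the already-clamped prefix: exact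
-- (index of the last '\n' in the prefix, none when absent)
def pvRFindNl (l : List Char) : Option Nat :=
  (l.reverse.findIdx? (· == '\n')).map (fun j => l.length - 1 - j)

def countLinesAndCols_alt (text : String) (endPos : Int) (startLine : Int) (startCol : Int) : Int × Int :=
  let l := text.toList
  let n : Int := max 0 (min endPos (l.length : Int))
  let pref := l.take n.toNat
  let line := startLine + (pref.count '\n' : Int)
  match pvRFindNl pref with
  | none => (line, startCol + n)
  | some last => (line, n - (last : Int) - 1)

-- ===== PRECONDITION & SPEC =====
def Spec_countLinesAndCols (text : String) (endPos : Int) (startLine : Int) (startCol : Int) (out : Int × Int) : Prop := out = countLinesAndCols_alt text endPos startLine startCol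
instance (text : String) (endPos : Int) (startLine : Int) (startCol : Int) (out : Int × Int) : Decidable (Spec_countLinesAndCols text endPos startLine startCol out) := by unfold Spec_countLinesAndCols; infer_instance

-- ===== CLAIM (what is proved, stated in full; the proofs are below) =====
def Claim_equal_countLinesAndCols : Prop := ∀ (text : String) (endPos : Int) (startLine : Int) (startCol : Int), Dom_countLinesAndCols text endPos startLine startCol → Spec_countLinesAndCols text endPos startLine startCol (countLinesAndCols text endPos startLine startCol)

-- ===== LEMMAS AND PROOFS =====

-- the loop body of A, as a fold step
def pvStep (st : Int × Int) (c : Char) : Int × Int :=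
  if c = '\n' then (st.1 + 1, 0) else (st.1, st.2 + 1)

-- the column component alone
def pvColStep (col : Int) (c : Char) : Int :=
  if c = '\n' then 0 else col + 1

lemma pvGoA_eq_foldl (endPos : Int) :
    ∀ (l : List Char) (i : Nat) (line col : Int),
      pvGoA endPos i l line col =
        (l.take (max 0 (min (endPos - i) (l.length : Int))).toNat).foldl pvStep (line, col) := by
  intro l
  induction l with
  | nil => intro i line col; simp [pvGoA]
  | cons c rest ih =>
    intro i line col
    by_cases h : (i : Int) ≥ endPos
    · have : (max 0 (min (endPos - i) ((c :: rest).length : Int))).toNat = 0 := by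
        simp; omega
      simp [pvGoA, h]
    · have hpos : 1 ≤ endPos - i := by omega
      have hm : (max 0 (min (endPos - i) ((c :: rest).length : Int))).toNat
          = (max 0 (min (endPos - (i + 1)) ((rest.length : Int)))).toNat + 1 := by
        simp only [List.length_cons]
        push_cast
        omega
      by_cases hc : c = '\n'
      · simp only [pvGoA, if_neg h, if_pos hc, hm, List.take_succ_cons, List.foldl_cons]
        rw [ih (i + 1) (line + 1) 0]
        simp [pvStep, hc]
      · simp only [pvGoA, if_neg h, if_neg hc, hm, List.take_succ_cons, List.foldl_cons]
        rw [ih (i + 1) line (col + 1)]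
        simp [pvStep, hc]

lemma pvFoldl_step_split (l : List Char) :
    ∀ (line col : Int),
      l.foldl pvStep (line, col) = (line + (l.count '\n' : Int), l.foldl pvColStep col) := by
  induction l with
  | nil => intro line col; simp
  | cons c rest ih =>
    intro line col
    by_cases hc : c = '\n'
    · simp [pvStep, pvColStep, hc, ih]
      ring
    · simp [pvStep, pvColStep, hc, ih]

lemma pvColAfter_rfind (l : List Char) :
    ∀ (col : Int),
      l.foldl pvColStep col =
        match l.reverse.findIdx? (· == '\n') with
        | none => col + (l.length : Int)
        | some j => (j : Int) := by
  induction l using List.reverseRecOn with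
  | nil => intro col; simp
  | append_singleton l c ih =>
    intro col
    rw [List.foldl_append]
    simp only [List.foldl_cons, List.foldl_nil, List.reverse_append, List.reverse_singleton,
      List.singleton_append, List.findIdx?_cons]
    by_cases hc : c = '\n'
    · simp [hc, pvColStep]
    · have hbeq : (c == '\n') = false := by simp [hc]
      rw [ih]
      cases hfi : l.reverse.findIdx? (· == '\n') with
      | none => simp [pvColStep, hc, hbeq]; ring
      | some j => simp [pvColStep, hc, hbeq]

lemma pvFindIdx?_lt {l : List Char} {j : Nat} (h : l.findIdx? (· == '\n') = some j) :
    j < l.length := List.findIdx?_eq_some_iff_findIdx_eq.mp h |>.1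

-- ===== VERDICT (by name: the statement is the Claim_ definition above) =====
theorem countLinesAndCols_spec : Claim_equal_countLinesAndCols := by
  intro text endPos startLine startCol _
  unfold Spec_countLinesAndCols countLinesAndCols countLinesAndCols_alt pvRFindNl
  rw [pvGoA_eq_foldl]
  have h0 : endPos - ((0 : Nat) : Int) = endPos := by simp
  rw [h0, pvFoldl_step_split, pvColAfter_rfind]
  simp only []
  generalize hpref : List.take (max 0 (min endPos ((text.toList.length : Nat) : Int))).toNat text.toList = pref
  have hnnn : ((pref.length : Nat) : Int) = max 0 (min endPos ((text.toList.length : Nat) : Int)) := by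
    rw [← hpref]; simp
  cases hfi : pref.reverse.findIdx? (· == '\n') with
  | none => simp [hnnn]
  | some j =>
    have hj : j < pref.length := by
      have := pvFindIdx?_lt hfi
      simpa using this
    simp only [Option.map_some, Prod.mk.injEq, true_and]
    rw [← hnnn]
    omega
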